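-- pv_equiv track=rewrite | github.com/dilipnikhil/-Image-Processing-for-Medical-Applications-ENGR-E-535- | Assignment 1/Assignment-1-Dilip.py | shiftingCharacters
-- ===== SOURCE A (Python) =====
-- def shiftingCharacters(inputStr: str, moves: list[int]) -> str:
--
--     alphabets = "abcdefghijklmnopqrstuvwxyz" # define a string of all the alphabets
--     magic_string = ""
--
--     for i in range(len(inputStr)):
--         total_shift = 0 # calculate the amount of shifts for each alphabet
--         for j in range(i, len(moves)):
--             total_shift = total_shift + moves[j] #calculate the total shifts for every alphabets
--         move_to_do = (total_shift + alphabets.index(inputStr[i])) % 26 #if it exceeds 26, get the remainder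
--         magic_string = magic_string + alphabets[move_to_do] # add to the magic string
--
--     return magic_string
-- ===== SOURCE B (Python) =====
-- def shiftingCharacters(inputStr: str, moves: list[int]) -> str:
--     # precompute suffix sums of moves in one pass, then shift each char arithmetically
--     suffix = [0] * (len(moves) + 1)
--     for j in range(len(moves) - 1, -1, -1):
--         suffix[j] = suffix[j + 1] + moves[j]
--     out = []
--     for i, c in enumerate(inputStr):
--         s = suffix[i] if i < len(suffix) else 0
--         out.append(chr((s + ord(c) - 97) % 26 + 97))
--     return ''.join(out)
-- ===== Notes on version B (the rewrite author's own statement) =====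
-- stated objective: faster
-- what changed: B precomputes the suffix sums of moves once (back-to-front) and maps each character by arithmetic on its char code, instead of re-summing the tail of moves for every character and scanning the alphabet string with .index.
-- outside the precondition, e.g. on shiftingCharacters('aB', [1]): A raises ValueError, B returns 'bv'
import Mathlib
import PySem

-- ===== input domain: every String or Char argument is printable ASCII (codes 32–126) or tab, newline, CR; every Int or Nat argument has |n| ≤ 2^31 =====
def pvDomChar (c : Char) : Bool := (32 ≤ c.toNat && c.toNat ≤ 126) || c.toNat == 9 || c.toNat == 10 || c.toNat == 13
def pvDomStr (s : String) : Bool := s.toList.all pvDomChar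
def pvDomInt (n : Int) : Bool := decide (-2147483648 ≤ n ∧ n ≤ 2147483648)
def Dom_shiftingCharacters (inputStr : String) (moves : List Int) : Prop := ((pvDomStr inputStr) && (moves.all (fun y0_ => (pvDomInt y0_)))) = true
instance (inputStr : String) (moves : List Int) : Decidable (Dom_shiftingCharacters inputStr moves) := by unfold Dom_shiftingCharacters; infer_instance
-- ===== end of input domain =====

-- B replaces A's per-character rescans (tail re-summation of moves and alphabet .index scan)
-- by one back-to-front suffix-sum pass and char-code arithmetic (objective: faster).

-- ===== PORT A =====
def shiftingCharacters (inputStr : String) (moves : List Int) : String :=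
  let alphabets := "abcdefghijklmnopqrstuvwxyz".toList
  let cs := inputStr.toList
  String.mk ((PySem.List.pyRange 0 (cs.length : Int) 1).foldl (fun acc i =>
    let totalShift := (PySem.List.pyRange i (moves.length : Int) 1).foldl
      (fun t j => t + PySem.List.pyGetD moves j 0) 0
    -- alphabets.index(inputStr[i]): total form of .index; Pre_ guarantees the char is found
    let moveToDo := PySem.Int.mod
      (totalShift + (((PySem.List.index? alphabets (PySem.List.pyGetD cs i ' ')).getD 0 : Nat) : Int)) 26
    acc ++ [PySem.List.pyGetD alphabets moveToDo ' ']) [])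

-- ===== PORT B =====
-- Source B builds suffix[j] = suffix[j+1] + moves[j] back to front; foldr is that construction.
def shiftingCharacters_alt (inputStr : String) (moves : List Int) : String :=
  let suffix := moves.foldr (fun m acc => (m + acc.headD 0) :: acc) ([0] : List Int)
  String.mk ((PySem.List.enumerate inputStr.toList).map (fun p =>
    let s := if p.1 < (suffix.length : Int) then PySem.List.pyGetD suffix p.1 0 else 0
    Char.ofNat ((PySem.Int.mod (s + (p.2.toNat : Int) - 97) 26).toNat + 97)))

-- ===== PRECONDITION & SPEC =====
-- Pre_ excludes strings with any character outside 'a'..'z': on those A's alphabets.index raises ValueError.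
def Pre_shiftingCharacters (inputStr : String) (moves : List Int) : Prop :=
  inputStr.toList.all (fun c => 'a' ≤ c && c ≤ 'z') = true
instance (inputStr : String) (moves : List Int) : Decidable (Pre_shiftingCharacters inputStr moves) := by
  unfold Pre_shiftingCharacters; infer_instance
def pvWitness_shiftingCharacters : String × List Int := ("abc", [1, 2])

def Spec_shiftingCharacters (inputStr : String) (moves : List Int) (out : String) : Prop := out = shiftingCharacters_alt inputStr moves
instance (inputStr : String) (moves : List Int) (out : String) : Decidable (Spec_shiftingCharacters inputStr moves out) := by unfold Spec_shiftingCharacters; infer_instance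

-- ===== CLAIM (what is proved, stated in full; the proofs are below) =====
def Claim_equal_shiftingCharacters : Prop := ∀ (inputStr : String) (moves : List Int), Dom_shiftingCharacters inputStr moves → Pre_shiftingCharacters inputStr moves → Spec_shiftingCharacters inputStr moves (shiftingCharacters inputStr moves)

-- ===== LEMMAS AND PROOFS =====

-- B's suffix list reads as tail sums.
lemma suffix_getD (moves : List Int) (k : Nat) :
    (moves.foldr (fun m acc => (m + acc.headD 0) :: acc) ([0] : List Int)).getD k 0
      = (moves.drop k).sum := by
  induction moves generalizing k with
  | nil => cases k <;> simp
  | cons m ms ih =>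
    cases k with
    | zero =>
      have h0 := ih 0
      simp only [List.foldr_cons, List.getD_cons_zero, List.drop_zero, List.sum_cons]
      have : (ms.foldr (fun m acc => (m + acc.headD 0) :: acc) ([0] : List Int)).headD 0
          = (ms.foldr (fun m acc => (m + acc.headD 0) :: acc) ([0] : List Int)).getD 0 0 := by
        cases ms.foldr (fun m acc => (m + acc.headD 0) :: acc) ([0] : List Int) <;> simp
      rw [this, h0]; simp
    | succ k => simpa using ih k

lemma suffix_length (moves : List Int) :
    (moves.foldr (fun m acc => (m + acc.headD 0) :: acc) ([0] : List Int)).length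
      = moves.length + 1 := by
  induction moves with
  | nil => simp
  | cons m ms ih => simpa using ih

lemma alpha_index (c : Char) (h1 : 97 ≤ c.toNat) (h2 : c.toNat ≤ 122) :
    PySem.List.index? "abcdefghijklmnopqrstuvwxyz".toList c = some (c.toNat - 97) := by
  have hc : c = Char.ofNat c.toNat := (Char.ofNat_toNat c).symm
  rw [hc]
  set n := c.toNat with hn
  interval_cases n <;> decide

lemma alpha_get (t : Nat) (ht : t < 26) :
    ("abcdefghijklmnopqrstuvwxyz".toList).getD t ' ' = Char.ofNat (t + 97) := by
  interval_cases t <;> decide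



-- ===== VERDICT (by name: the statement is the Claim_ definition above) =====
theorem shiftingCharacters_spec : Claim_equal_shiftingCharacters := by
  intro inputStr moves _ hpre
  unfold Spec_shiftingCharacters shiftingCharacters shiftingCharacters_alt
  simp only []
  congr 1
  rw [PySem.List.foldl_append_singleton_eq_map, List.nil_append,
      PySem.List.enumerate_eq_map_pyRange (d := ' '), List.map_map]
  apply List.map_congr_left
  intro i hi
  rw [PySem.List.mem_pyRange_one] at hi
  obtain ⟨hi0, hilen⟩ := hi
  -- the character at index i is in 'a'..'z'
  have hmem : PySem.List.pyGetD inputStr.toList i ' ' ∈ inputStr.toList :=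
    PySem.List.pyGetD_mem inputStr.toList ' ' (by constructor <;> omega)
  have hc := List.all_eq_true.mp hpre _ hmem
  set c := PySem.List.pyGetD inputStr.toList i ' ' with hcdef
  have h97 : 97 ≤ c.toNat := by
    have := (Bool.and_eq_true _ _).mp hc |>.1
    simpa [Char.le_def] using this
  have h122 : c.toNat ≤ 122 := by
    have := (Bool.and_eq_true _ _).mp hc |>.2
    simpa [Char.le_def] using this
  -- inner sum of A = drop-sum
  have hT : (PySem.List.pyRange i (moves.length : Int) 1).foldl
      (fun t j => t + PySem.List.pyGetD moves j 0) 0 = (moves.drop i.toNat).sum := by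
    rw [PySem.List.foldl_pyRange_pyGetD' moves 0 (fun (t x : Int) => t + x) 0 hi0]
    simp [List.sum_eq_foldl]
  -- B's shift amount = drop-sum
  set suffix := moves.foldr (fun m acc => (m + acc.headD 0) :: acc) ([0] : List Int) with hsuf
  have hS : (if i < (suffix.length : Int) then PySem.List.pyGetD suffix i 0 else 0)
      = (moves.drop i.toNat).sum := by
    by_cases hcase : i < (suffix.length : Int)
    · rw [if_pos hcase, PySem.List.pyGetD_of_nonneg suffix 0 hi0, hsuf]
      exact suffix_getD moves i.toNat
    · rw [if_neg hcase]
      have hlen : suffix.length = moves.length + 1 := by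
        rw [hsuf]; exact suffix_length moves
      have : moves.length < i.toNat := by omega
      rw [List.drop_eq_nil_of_le (by omega)]; simp
  simp only [Function.comp_apply]
  rw [← hcdef, alpha_index c h97 h122]
  simp only [Option.getD_some, hT, hS]
  -- both shift arguments coincide
  have hcast : ((c.toNat - 97 : Nat) : Int) = (c.toNat : Int) - 97 := by omega
  have harg : (moves.drop i.toNat).sum + ((c.toNat - 97 : Nat) : Int)
      = (moves.drop i.toNat).sum + (c.toNat : Int) - 97 := by omega
  rw [hcast] at harg ⊢
  rw [show (moves.drop i.toNat).sum + ((c.toNat : Int) - 97)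
        = (moves.drop i.toNat).sum + (c.toNat : Int) - 97 by ring]
  set r := PySem.Int.mod ((moves.drop i.toNat).sum + (c.toNat : Int) - 97) 26 with hr
  have hr0 : 0 ≤ r := PySem.Int.mod_nonneg _ (by norm_num)
  have hr26 : r < 26 := PySem.Int.mod_lt _ (by norm_num)
  rw [PySem.List.pyGetD_of_nonneg _ _ hr0, List.getD_eq_getD_getElem?]
  have : ("abcdefghijklmnopqrstuvwxyz".toList).getD r.toNat ' ' = Char.ofNat (r.toNat + 97) :=
    alpha_get r.toNat (by omega)
  rw [List.getD_eq_getD_getElem?] at this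
  exact this
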